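-- pv_equiv track=rewrite | github.com/doriankovacevic/ikabotPlus | ikabot/function/sendCulturalTreatyRequests.py | _merge_outgoing_timestamps
-- ===== SOURCE A (Python) =====
-- def _merge_outgoing_timestamps(
--     outbox_timestamps, local_bot_timestamps, tolerance_seconds=10
-- ):
--     """Merge outgoing timestamps without double-counting bot sends already visible in outbox."""
--     merged = list(outbox_timestamps)
--     unmatched_local = []
--
--     for bot_timestamp in local_bot_timestamps:
--         if any(
--             abs(outbox_timestamp - bot_timestamp) <= tolerance_seconds
--             for outbox_timestamp in outbox_timestamps
--         ):
--             continue
--         merged.append(bot_timestamp)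
--         unmatched_local.append(bot_timestamp)
--
--     return merged, unmatched_local
-- ===== SOURCE B (Python) =====
-- def _merge_outgoing_timestamps(
--     outbox_timestamps, local_bot_timestamps, tolerance_seconds=10
-- ):
--     """Merge outgoing timestamps without double-counting bot sends already visible in outbox."""
--     s = sorted(outbox_timestamps)
--     n = len(s)
--     merged = list(outbox_timestamps)
--     unmatched_local = []
--
--     for bot_timestamp in local_bot_timestamps:
--         # binary search: first index with s[i] >= bot_timestamp - tolerance_seconds
--         x = bot_timestamp - tolerance_seconds
--         lo, hi = 0, n
--         while lo < hi:
--             mid = (lo + hi) // 2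
--             if s[mid] < x:
--                 lo = mid + 1
--             else:
--                 hi = mid
--         if lo < n and s[lo] <= bot_timestamp + tolerance_seconds:
--             continue
--         merged.append(bot_timestamp)
--         unmatched_local.append(bot_timestamp)
--
--     return merged, unmatched_local
-- ===== Notes on version B (the rewrite author's own statement) =====
-- stated objective: faster
-- what changed: A scans the whole outbox list for every bot timestamp; B sorts the outbox once and decides each bot timestamp with a binary search for the first element >= t - tolerance, checking it against t + tolerance.
import Mathlib
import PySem

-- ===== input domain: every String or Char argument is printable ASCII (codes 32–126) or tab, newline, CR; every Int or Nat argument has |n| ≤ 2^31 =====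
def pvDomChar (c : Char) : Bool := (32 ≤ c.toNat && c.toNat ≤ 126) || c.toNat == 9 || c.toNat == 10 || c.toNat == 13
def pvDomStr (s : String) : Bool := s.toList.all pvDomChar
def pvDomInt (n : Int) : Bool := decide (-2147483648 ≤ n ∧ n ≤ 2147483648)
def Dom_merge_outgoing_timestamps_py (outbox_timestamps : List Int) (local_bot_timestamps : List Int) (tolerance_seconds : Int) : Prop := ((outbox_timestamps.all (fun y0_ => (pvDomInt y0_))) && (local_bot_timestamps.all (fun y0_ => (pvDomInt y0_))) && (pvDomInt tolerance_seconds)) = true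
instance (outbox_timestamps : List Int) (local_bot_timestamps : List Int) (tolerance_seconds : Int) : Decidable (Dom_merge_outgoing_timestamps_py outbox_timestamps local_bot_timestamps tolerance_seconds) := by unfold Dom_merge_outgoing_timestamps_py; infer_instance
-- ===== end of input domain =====

-- B replaces A's inner linear scan of the outbox by one initial sort plus a hand-rolled
-- binary search per bot timestamp (O((n+m) log n) instead of O(n*m)); same return value.

-- ===== PORT A =====
-- for each bot timestamp: skip it if any outbox timestamp is within tolerance,
-- else append it to both `merged` (initially the outbox list) and `unmatched_local`
def merge_outgoing_timestamps_py (outbox_timestamps : List Int) (local_bot_timestamps : List Int) (tolerance_seconds : Int) : List Int × List Int :=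
  local_bot_timestamps.foldl
    (fun acc bot_timestamp =>
      if outbox_timestamps.any (fun outbox_timestamp => decide (|outbox_timestamp - bot_timestamp| ≤ tolerance_seconds)) then
        acc
      else
        (acc.1 ++ [bot_timestamp], acc.2 ++ [bot_timestamp]))
    (outbox_timestamps, [])

-- ===== PORT B =====
-- Source B's hand-rolled bisect_left loop: first index i in [lo,hi) with s[i] ≥ x
-- (callers keep hi ≤ s.length, so the getD default 0 is never read: it only makes the recursion total)
def pvBisect (s : List Int) (x : Int) (lo hi : Nat) : Nat :=
  if lo < hi then
    let mid := (lo + hi) / 2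
    if s.getD mid 0 < x then pvBisect s x (mid + 1) hi
    else pvBisect s x lo mid
  else lo
termination_by hi - lo
decreasing_by all_goals omega

-- Source B's per-timestamp test `lo < n and s[lo] <= bot_timestamp + tolerance_seconds`
def pvMatched (s : List Int) (bot_timestamp tolerance_seconds : Int) : Bool :=
  let lo := pvBisect s (bot_timestamp - tolerance_seconds) 0 s.length
  decide (lo < s.length) && decide (s.getD lo 0 ≤ bot_timestamp + tolerance_seconds)

def merge_outgoing_timestamps_py_alt (outbox_timestamps : List Int) (local_bot_timestamps : List Int) (tolerance_seconds : Int) : List Int × List Int :=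
  let s := PySem.List.sorted outbox_timestamps (fun v => v) false
  local_bot_timestamps.foldl
    (fun acc bot_timestamp =>
      if pvMatched s bot_timestamp tolerance_seconds then
        acc
      else
        (acc.1 ++ [bot_timestamp], acc.2 ++ [bot_timestamp]))
    (outbox_timestamps, [])

-- ===== PRECONDITION & SPEC =====
def Spec_merge_outgoing_timestamps_py (outbox_timestamps : List Int) (local_bot_timestamps : List Int) (tolerance_seconds : Int) (out : List Int × List Int) : Prop := out = merge_outgoing_timestamps_py_alt outbox_timestamps local_bot_timestamps tolerance_seconds
instance (outbox_timestamps : List Int) (local_bot_timestamps : List Int) (tolerance_seconds : Int) (out : List Int × List Int) : Decidable (Spec_merge_outgoing_timestamps_py outbox_timestamps local_bot_timestamps tolerance_seconds out) := by unfold Spec_merge_outgoing_timestamps_py; infer_instance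

-- ===== CLAIM (what is proved, stated in full; the proofs are below) =====
def Claim_equal_merge_outgoing_timestamps_py : Prop := ∀ (outbox_timestamps : List Int) (local_bot_timestamps : List Int) (tolerance_seconds : Int), Dom_merge_outgoing_timestamps_py outbox_timestamps local_bot_timestamps tolerance_seconds → Spec_merge_outgoing_timestamps_py outbox_timestamps local_bot_timestamps tolerance_seconds (merge_outgoing_timestamps_py outbox_timestamps local_bot_timestamps tolerance_seconds)

-- ===== LEMMAS AND PROOFS =====

-- sorted lists are index-monotone
lemma pvSorted_mono (s : List Int) (hs : s.Pairwise (· ≤ ·)) {p q : Nat}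
    (hpq : p ≤ q) (hq : q < s.length) : s[p]'(by omega) ≤ s[q] := by
  rcases Nat.lt_or_ge p q with h | h
  · exact List.pairwise_iff_getElem.mp hs p q (by omega) hq h
  · have : p = q := by omega
    subst this; exact le_refl _

-- binary-search invariant: the result splits [lo,hi) at the first element ≥ x
lemma pvBisect_spec (s : List Int) (x : Int) (hs : s.Pairwise (· ≤ ·)) (lo hi : Nat) :
    hi ≤ s.length → lo ≤ hi →
    lo ≤ pvBisect s x lo hi ∧ pvBisect s x lo hi ≤ hi ∧
    (∀ j (hj : j < s.length), lo ≤ j → j < pvBisect s x lo hi → s[j] < x) ∧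
    (∀ j (hj : j < s.length), pvBisect s x lo hi ≤ j → j < hi → x ≤ s[j]) := by
  induction lo, hi using pvBisect.induct (s := s) (x := x) with
  | case1 lo hi hlt mid hmidlt ih =>
    intro hhi hlh
    have hmideq : mid = (lo + hi) / 2 := rfl
    have hmidlen : mid < s.length := by omega
    have hsm : s[mid] < x := by
      rwa [List.getD_eq_getElem s 0 hmidlen] at hmidlt
    obtain ⟨h1, h2, h3, h4⟩ := ih (by omega) (by omega)
    rw [pvBisect, if_pos hlt, if_pos hmidlt]
    simp only [show (lo + hi) / 2 = mid from rfl]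
    refine ⟨by omega, h2, ?_, ?_⟩
    · intro j hj hloj hjlt
      rcases Nat.lt_or_ge j (mid + 1) with h | h
      · exact lt_of_le_of_lt (pvSorted_mono s hs (by omega) hmidlen) hsm
      · exact h3 j hj h hjlt
    · intro j hj hij hjhi; exact h4 j hj hij hjhi
  | case2 lo hi hlt mid hmidge ih =>
    intro hhi hlh
    have hmideq : mid = (lo + hi) / 2 := rfl
    have hmidlen : mid < s.length := by omega
    have hsm : x ≤ s[mid] := by
      rw [List.getD_eq_getElem s 0 hmidlen] at hmidge; omega
    obtain ⟨h1, h2, h3, h4⟩ := ih (by omega) (by omega)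
    rw [pvBisect, if_pos hlt, if_neg hmidge]
    simp only [show (lo + hi) / 2 = mid from rfl]
    refine ⟨h1, by omega, ?_, ?_⟩
    · intro j hj hloj hjlt; exact h3 j hj hloj hjlt
    · intro j hj hij hjhi
      rcases Nat.lt_or_ge j mid with h | h
      · exact h4 j hj hij h
      · exact le_trans hsm (pvSorted_mono s hs h hj)
  | case3 lo hi hnlt =>
    intro hhi hlh
    rw [pvBisect, if_neg hnlt]
    exact ⟨le_refl _, hlh, by omega, by omega⟩

-- the binary-search test on the sorted outbox equals A's linear `any` scan
lemma pvMatched_eq_any (outbox : List Int) (t tol : Int) :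
    pvMatched (PySem.List.sorted outbox (fun v => v) false) t tol
      = outbox.any (fun x => decide (|x - t| ≤ tol)) := by
  set s := PySem.List.sorted outbox (fun v => v) false with hsdef
  have hs : s.Pairwise (· ≤ ·) := PySem.List.sorted_pairwise outbox (fun v => v)
  obtain ⟨h1, h2, h3, h4⟩ := pvBisect_spec s (t - tol) hs 0 s.length le_rfl (Nat.zero_le _)
  set lo := pvBisect s (t - tol) 0 s.length with hlodef
  rw [Bool.eq_iff_iff]
  simp only [pvMatched, ← hlodef, Bool.and_eq_true, decide_eq_true_eq, List.any_eq_true]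
  constructor
  · rintro ⟨hlt, hle⟩
    rw [List.getD_eq_getElem s 0 hlt] at hle
    refine ⟨s[lo], ?_, ?_⟩
    · exact (PySem.List.mem_sorted outbox (fun v => v) false _).mp (List.getElem_mem hlt)
    · have := h4 lo hlt le_rfl hlt
      rw [abs_le]; omega
  · rintro ⟨x, hx, habs⟩
    rw [abs_le] at habs
    have hxs : x ∈ s := (PySem.List.mem_sorted outbox (fun v => v) false _).mpr hx
    obtain ⟨j, hj, hxj⟩ := List.mem_iff_getElem.mp hxs
    have hge : t - tol ≤ s[j] := by rw [hxj]; omega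
    have hjlo : lo ≤ j := by
      by_contra h
      have := h3 j hj (Nat.zero_le _) (by omega)
      omega
    have hlt : lo < s.length := by omega
    refine ⟨hlt, ?_⟩
    rw [List.getD_eq_getElem s 0 hlt]
    have := pvSorted_mono s hs hjlo hj
    rw [hxj] at this
    omega

-- ===== VERDICT (by name: the statement is the Claim_ definition above) =====
theorem merge_outgoing_timestamps_py_spec : Claim_equal_merge_outgoing_timestamps_py := by
  intro outbox locs tol _
  unfold Spec_merge_outgoing_timestamps_py merge_outgoing_timestamps_py merge_outgoing_timestamps_py_alt
  simp only [pvMatched_eq_any]
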